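-- pv_equiv track=rewrite | github.com/amar3012005/AgentScope | src/prompts/prompt_loader.py | detect_intent_and_load_skills
-- ===== SOURCE A (Python) =====
-- from typing import List, Optional
--
-- def detect_intent_and_load_skills(user_request: str) -> List[str]:
--     """
--     Detect user intent from their request and return relevant skill names.
--
--     This uses simple keyword matching. For production, replace with LLM-based intent classification.
--
--     Args:
--         user_request: The user's task/request string
--
--     Returns:
--         List of relevant skill names to load
--     """
--     request_lower = user_request.lower()
--     skills_to_load = []
--
--     # Pitch Deck / Presentation detection
--     if any(term in request_lower for term in ["pitch deck", "presentation", "investor", "slide", "deck"]):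
--         skills_to_load.extend(["visual_director", "pitch_deck", "copywriter"])
--
--     # Landing Page / Website detection
--     elif any(term in request_lower for term in ["landing page", "website", "web page", "homepage"]):
--         skills_to_load.extend(["visual_director", "ux_architect", "copywriter"])
--
--     # Dashboard / Data visualization detection
--     elif any(term in request_lower for term in ["dashboard", "metrics", "kpi", "data viz", "chart", "graph"]):
--         skills_to_load.extend(["visual_director", "data_viz", "ux_architect"])
--
--     # Social Media / Content detection
--     elif any(term in request_lower for term in ["linkedin", "twitter", "social", "post", "article", "blog"]):
--         skills_to_load.extend(["copywriter", "visual_director"])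
--
--     # Documentation / Technical detection
--     elif any(term in request_lower for term in ["documentation", "api", "technical", "spec", "architecture"]):
--         skills_to_load.extend(["ux_architect", "copywriter"])
--
--     # Default: Visual + Copy for general content
--     else:
--         skills_to_load.extend(["visual_director", "copywriter"])
--
--     # Always include UX Architect for interactive content
--     if "interactive" in request_lower or "ui" in request_lower or "ux" in request_lower:
--         if "ux_architect" not in skills_to_load:
--             skills_to_load.append("ux_architect")
--
--     return list(set(skills_to_load))  # Remove duplicates
-- ===== SOURCE B (Python) =====
-- # B: instead of running a substring search per keyword, do ONE left-to-right scan of the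
-- # lowered request, collecting the set of keywords that start at each position; the skill
-- # list is then decided purely from that hit set.
--
-- _GROUPS = [
--     (["pitch deck", "presentation", "investor", "slide", "deck"],
--      ["visual_director", "pitch_deck", "copywriter"]),
--     (["landing page", "website", "web page", "homepage"],
--      ["visual_director", "ux_architect", "copywriter"]),
--     (["dashboard", "metrics", "kpi", "data viz", "chart", "graph"],
--      ["visual_director", "data_viz", "ux_architect"]),
--     (["linkedin", "twitter", "social", "post", "article", "blog"],
--      ["copywriter", "visual_director"]),
--     (["documentation", "api", "technical", "spec", "architecture"],
--      ["ux_architect", "copywriter"]),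
-- ]
--
-- _FLAG_TERMS = ["interactive", "ui", "ux"]
--
-- _ALL_TERMS = [t for terms, _ in _GROUPS for t in terms] + _FLAG_TERMS
--
--
-- def _matched_terms(rl):
--     """One pass over rl: every keyword that occurs somewhere in rl, as a set."""
--     hits = set()
--     for i in range(len(rl)):
--         for t in _ALL_TERMS:
--             if t not in hits and rl.startswith(t, i):
--                 hits.add(t)
--     return hits
--
--
-- def detect_intent_and_load_skills(user_request: str) -> list:
--     hits = _matched_terms(user_request.lower())
--     skills = ["visual_director", "copywriter"]
--     for terms, out in _GROUPS:
--         if any(t in hits for t in terms):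
--             skills = list(out)
--             break
--     if any(t in hits for t in _FLAG_TERMS) and "ux_architect" not in skills:
--         skills.append("ux_architect")
--     return list(set(skills))
-- ===== Notes on version B (the rewrite author's own statement) =====
-- stated objective: alternative
-- what changed: B replaces A's independent per-keyword substring tests by a single left-to-right positional scan of the lowered request that collects the set of all matched keywords at once; the category and the interactive flag are then decided by membership in that hit set instead of by fresh substring searches.
import Mathlib
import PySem

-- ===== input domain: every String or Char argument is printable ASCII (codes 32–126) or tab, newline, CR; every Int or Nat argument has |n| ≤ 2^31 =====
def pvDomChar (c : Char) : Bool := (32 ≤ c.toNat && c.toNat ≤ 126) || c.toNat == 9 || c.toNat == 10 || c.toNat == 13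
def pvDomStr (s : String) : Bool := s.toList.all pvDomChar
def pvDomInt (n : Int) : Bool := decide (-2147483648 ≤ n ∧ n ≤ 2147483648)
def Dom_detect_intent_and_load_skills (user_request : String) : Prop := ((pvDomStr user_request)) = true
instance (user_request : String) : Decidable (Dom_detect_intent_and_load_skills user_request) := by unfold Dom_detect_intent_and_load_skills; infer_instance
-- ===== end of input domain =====

-- B replaces the per-keyword substring tests by one positional scan collecting the matched-keyword set (alternative algorithm, same cost class).
-- ===== PORT A =====
def detect_intent_and_load_skills (user_request : String) : List String :=
  let request_lower := PySem.Str.lower user_request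
  let skills_to_load : List String :=
    if ["pitch deck", "presentation", "investor", "slide", "deck"].any
         (fun term => PySem.Str.isIn term request_lower) then
      ["visual_director", "pitch_deck", "copywriter"]
    else if ["landing page", "website", "web page", "homepage"].any
         (fun term => PySem.Str.isIn term request_lower) then
      ["visual_director", "ux_architect", "copywriter"]
    else if ["dashboard", "metrics", "kpi", "data viz", "chart", "graph"].any
         (fun term => PySem.Str.isIn term request_lower) then
      ["visual_director", "data_viz", "ux_architect"]
    else if ["linkedin", "twitter", "social", "post", "article", "blog"].any
         (fun term => PySem.Str.isIn term request_lower) then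
      ["copywriter", "visual_director"]
    else if ["documentation", "api", "technical", "spec", "architecture"].any
         (fun term => PySem.Str.isIn term request_lower) then
      ["ux_architect", "copywriter"]
    else
      ["visual_director", "copywriter"]
  let skills_to_load :=
    if (PySem.Str.isIn "interactive" request_lower || PySem.Str.isIn "ui" request_lower
        || PySem.Str.isIn "ux" request_lower)
       && !(skills_to_load.contains "ux_architect") then
      skills_to_load ++ ["ux_architect"]
    else skills_to_load
  PySem.Set.ofList skills_to_load

-- ===== PORT B =====
def pvGroups : List (List String × List String) :=
  [ (["pitch deck", "presentation", "investor", "slide", "deck"],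
     ["visual_director", "pitch_deck", "copywriter"]),
    (["landing page", "website", "web page", "homepage"],
     ["visual_director", "ux_architect", "copywriter"]),
    (["dashboard", "metrics", "kpi", "data viz", "chart", "graph"],
     ["visual_director", "data_viz", "ux_architect"]),
    (["linkedin", "twitter", "social", "post", "article", "blog"],
     ["copywriter", "visual_director"]),
    (["documentation", "api", "technical", "spec", "architecture"],
     ["ux_architect", "copywriter"]) ]

def pvFlagTerms : List String := ["interactive", "ui", "ux"]

def pvAllTerms : List String := (pvGroups.flatMap (·.1)) ++ pvFlagTerms

-- one pass over rl: the set of keywords occurring in rl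
-- (rl.startswith(t, i) with 0 ≤ i ≤ len(rl) is exactly 'startswith (rl.drop i) t')
def pvMatchedTerms (rl : List Char) : PySem.Set String :=
  (List.range rl.length).foldl
    (fun hits i =>
      pvAllTerms.foldl
        (fun hits t =>
          if !(PySem.Set.contains hits t)
              && PySem.Chars.startswith (rl.drop i) t.toList then
            PySem.Set.add hits t
          else hits)
        hits)
    PySem.Set.empty

def detect_intent_and_load_skills_alt (user_request : String) : List String :=
  let hits := pvMatchedTerms (PySem.Str.lower user_request).toList
  let skills :=
    (pvGroups.find? (fun g => g.1.any (fun t => PySem.Set.contains hits t))).elim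
      ["visual_director", "copywriter"] (fun g => g.2)
  let skills :=
    if pvFlagTerms.any (fun t => PySem.Set.contains hits t)
        && !(skills.contains "ux_architect") then
      skills ++ ["ux_architect"]
    else skills
  PySem.Set.ofList skills

-- ===== PRECONDITION & SPEC =====
def Spec_detect_intent_and_load_skills (user_request : String) (out : List String) : Prop := out = detect_intent_and_load_skills_alt user_request
instance (user_request : String) (out : List String) : Decidable (Spec_detect_intent_and_load_skills user_request out) := by unfold Spec_detect_intent_and_load_skills; infer_instance

-- ===== CLAIM (what is proved, stated in full; the proofs are below) =====
def Claim_equal_detect_intent_and_load_skills : Prop := ∀ (user_request : String), Dom_detect_intent_and_load_skills user_request → Spec_detect_intent_and_load_skills user_request (detect_intent_and_load_skills user_request)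

-- ===== LEMMAS AND PROOFS =====

-- membership after the inner per-position fold over the keyword list
theorem pv_mem_inner (rl : List Char) (i : Nat) (terms : List String)
    (hits : PySem.Set String) (x : String) :
    x ∈ terms.foldl
        (fun hits t =>
          if !(PySem.Set.contains hits t)
              && PySem.Chars.startswith (rl.drop i) t.toList then
            PySem.Set.add hits t
          else hits) hits
      ↔ x ∈ hits ∨ (x ∈ terms ∧ PySem.Chars.startswith (rl.drop i) x.toList = true) := by
  induction terms generalizing hits with
  | nil => simp
  | cons t ts ih =>
    simp only [List.foldl_cons]
    rw [ih]
    by_cases hx : x = t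
    · subst hx
      by_cases hc : PySem.Set.contains hits x = true <;>
        by_cases hs : PySem.Chars.startswith (rl.drop i) x.toList = true <;>
          simp_all
    · by_cases hc : PySem.Set.contains hits t = true <;>
        by_cases hs : PySem.Chars.startswith (rl.drop i) t.toList = true <;>
          simp_all

-- membership after the outer scan over positions 0..n-1
theorem pv_mem_scan (rl : List Char) (n : Nat) (x : String) :
    x ∈ (List.range n).foldl
        (fun hits i =>
          pvAllTerms.foldl
            (fun hits t =>
              if !(PySem.Set.contains hits t)
                  && PySem.Chars.startswith (rl.drop i) t.toList then
                PySem.Set.add hits t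
              else hits) hits)
        PySem.Set.empty
      ↔ x ∈ pvAllTerms ∧ ∃ i < n, PySem.Chars.startswith (rl.drop i) x.toList = true := by
  induction n with
  | zero => simp [PySem.Set.empty]
  | succ n ih =>
    rw [List.range_succ, List.foldl_append, List.foldl_cons, List.foldl_nil, pv_mem_inner, ih]
    constructor
    · rintro (⟨ha, i, hi, hsw⟩ | ⟨ha, hsw⟩)
      · exact ⟨ha, i, Nat.lt_succ_of_lt hi, hsw⟩
      · exact ⟨ha, n, Nat.lt_succ_self n, hsw⟩
    · rintro ⟨ha, i, hi, hsw⟩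
      rcases Nat.lt_succ_iff_lt_or_eq.mp hi with h | h
      · exact Or.inl ⟨ha, i, h, hsw⟩
      · subst h; exact Or.inr ⟨ha, hsw⟩

theorem pv_contains_matched (rl : List Char) (t : String)
    (ht : t ∈ pvAllTerms) (hne : t.toList ≠ []) :
    PySem.Set.contains (pvMatchedTerms rl) t = PySem.Chars.isIn t.toList rl := by
  rw [Bool.eq_iff_iff, PySem.Set.contains_iff]
  unfold pvMatchedTerms
  rw [pv_mem_scan, ← PySem.Chars.exists_prefix_drop_iff_isIn]
  constructor
  · rintro ⟨-, i, -, hsw⟩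
    exact ⟨i, (PySem.Chars.startswith_iff _ _).mp hsw⟩
  · rintro ⟨j, hj⟩
    refine ⟨ht, j, ?_, (PySem.Chars.startswith_iff _ _).mpr hj⟩
    by_contra hge
    have hdrop : rl.drop j = [] := List.drop_eq_nil_of_le (Nat.le_of_not_lt hge)
    rw [hdrop] at hj
    exact hne (List.prefix_nil.mp hj)

theorem pv_any_contains (rl : List Char) (g : List String)
    (hg : ∀ t ∈ g, t ∈ pvAllTerms ∧ t.toList ≠ []) :
    g.any (fun t => PySem.Set.contains (pvMatchedTerms rl) t)
      = g.any (fun t => PySem.Chars.isIn t.toList rl) :=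
  PySem.List.any_congr_mem (fun t ht => pv_contains_matched rl t (hg t ht).1 (hg t ht).2)

-- the first-match lookup over pvGroups unfolded into the five-way chain
set_option maxHeartbeats 1000000 in
theorem pvSelect (rl : List Char) :
    ((pvGroups.find? (fun g => g.1.any (fun t => PySem.Set.contains (pvMatchedTerms rl) t))).elim
        ["visual_director", "copywriter"] (fun g => g.2)) =
      (if ["pitch deck", "presentation", "investor", "slide", "deck"].any (fun t => PySem.Chars.isIn t.toList rl) then ["visual_director", "pitch_deck", "copywriter"]
       else if ["landing page", "website", "web page", "homepage"].any (fun t => PySem.Chars.isIn t.toList rl) then ["visual_director", "ux_architect", "copywriter"]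
       else if ["dashboard", "metrics", "kpi", "data viz", "chart", "graph"].any (fun t => PySem.Chars.isIn t.toList rl) then ["visual_director", "data_viz", "ux_architect"]
       else if ["linkedin", "twitter", "social", "post", "article", "blog"].any (fun t => PySem.Chars.isIn t.toList rl) then ["copywriter", "visual_director"]
       else if ["documentation", "api", "technical", "spec", "architecture"].any (fun t => PySem.Chars.isIn t.toList rl) then ["ux_architect", "copywriter"]
       else ["visual_director", "copywriter"]) := by
  have e1 := pv_any_contains rl ["pitch deck", "presentation", "investor", "slide", "deck"] (by decide)
  have e2 := pv_any_contains rl ["landing page", "website", "web page", "homepage"] (by decide)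
  have e3 := pv_any_contains rl ["dashboard", "metrics", "kpi", "data viz", "chart", "graph"] (by decide)
  have e4 := pv_any_contains rl ["linkedin", "twitter", "social", "post", "article", "blog"] (by decide)
  have e5 := pv_any_contains rl ["documentation", "api", "technical", "spec", "architecture"] (by decide)
  simp only [pvGroups, List.find?_cons, List.find?_nil, e1, e2, e3, e4, e5]
  by_cases h1 : (["pitch deck", "presentation", "investor", "slide", "deck"].any (fun t => PySem.Chars.isIn t.toList rl)) = true <;>
    by_cases h2 : (["landing page", "website", "web page", "homepage"].any (fun t => PySem.Chars.isIn t.toList rl)) = true <;>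
      by_cases h3 : (["dashboard", "metrics", "kpi", "data viz", "chart", "graph"].any (fun t => PySem.Chars.isIn t.toList rl)) = true <;>
        by_cases h4 : (["linkedin", "twitter", "social", "post", "article", "blog"].any (fun t => PySem.Chars.isIn t.toList rl)) = true <;>
          by_cases h5 : (["documentation", "api", "technical", "spec", "architecture"].any (fun t => PySem.Chars.isIn t.toList rl)) = true <;>
            simp only [h1, h2, h3, h4, h5] <;> rfl

-- ===== VERDICT (by name: the statement is the Claim_ definition above) =====
set_option maxHeartbeats 1000000 in
theorem detect_intent_and_load_skills_spec : Claim_equal_detect_intent_and_load_skills := by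
  intro s _
  unfold Spec_detect_intent_and_load_skills detect_intent_and_load_skills detect_intent_and_load_skills_alt
  have ef := pv_any_contains (PySem.Str.lower s).toList pvFlagTerms (by decide)
  simp only [pvSelect, ef]
  simp only [pvFlagTerms, List.any_cons, List.any_nil, Bool.or_false,
    PySem.Str.isIn_eq, Bool.or_assoc]
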